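-- pv_equiv track=rewrite | github.com/skipiano/word_grouping | main.py | group_folders
-- ===== SOURCE A (Python) =====
-- def group_folders(folders):
--     folder_names = []
--     for j in range(len(folders)):
--         name = folders[j]
--         max_folder_name = []
--         for i in range(len(name)):
--             for k in range(len(folders)):
--                 other_name = folders[k]
--                 if j == k:
--                     continue
--                 if len(other_name) > i and name[:i+1] == other_name[:i+1]:
--                     max_folder_name = name[:i+1]
--                     break
--         if not max_folder_name:
--             folder_names.append(name)
--         else:
--             folder_names.append(max_folder_name)
--     # for name in folders:
--     #     max_folder_name = []
--     #     for i in range(len(name)):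
--     #         for other_name in folders:
--     #             if other_name == name:
--     #                 continue
--     #             if len(other_name) > i and name[:i+1] == other_name[:i+1]:
--     #                 max_folder_name = name[:i+1]
--     #                 break
--     #     if not max_folder_name:
--     #         folder_names.append(name)
--     #     else:
--     #         folder_names.append(max_folder_name)
--     return folder_names
-- ===== SOURCE B (Python) =====
-- def _lcp(s, t):
--     m = 0
--     for x, y in zip(s, t):
--         if x != y:
--             break
--         m += 1
--     return m
--
--
-- def group_folders(folders):
--     n = len(folders)
--     order = sorted(range(n), key=lambda i: folders[i])
--     best = {}
--     for p in range(n):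
--         j = order[p]
--         m = 0
--         if p > 0:
--             m = _lcp(folders[order[p - 1]], folders[j])
--         if p + 1 < n:
--             m = max(m, _lcp(folders[j], folders[order[p + 1]]))
--         best[j] = m
--     return [folders[j][:best[j]] if best[j] else folders[j] for j in range(n)]
-- ===== Notes on version B (the rewrite author's own statement) =====
-- stated objective: faster
-- what changed: A rescans every other folder for every prefix length of every folder (all pairs, per character); B sorts the indices by folder name once and reads each folder's maximal shared prefix length off its two neighbours in sorted order, since the longest common prefix with any other string is attained at an adjacent string in sorted order.
import Mathlib
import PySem

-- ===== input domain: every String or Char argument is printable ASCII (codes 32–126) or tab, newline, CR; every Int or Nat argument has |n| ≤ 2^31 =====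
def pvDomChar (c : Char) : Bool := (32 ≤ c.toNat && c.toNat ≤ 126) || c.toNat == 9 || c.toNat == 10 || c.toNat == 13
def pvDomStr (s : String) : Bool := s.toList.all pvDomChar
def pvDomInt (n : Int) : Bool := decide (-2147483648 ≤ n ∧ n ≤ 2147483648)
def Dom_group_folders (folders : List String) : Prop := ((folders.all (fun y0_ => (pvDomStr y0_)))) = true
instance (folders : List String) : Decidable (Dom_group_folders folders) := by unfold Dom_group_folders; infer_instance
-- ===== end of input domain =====

-- B replaces A's all-pairs, per-character prefix rescans by sort-then-adjacent-LCP (each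
-- folder's longest shared prefix is attained at a neighbour in sorted order): alternative,
-- asymptotically faster algorithm, identical return value.

-- ===== PORT A =====
-- inner `for k in range(len(folders))` loop with its break
def pvInnerK (folders : List String) (j i : Int) (name : String) :
    List Int → String → String
  | [], mfn => mfn
  | k :: ks, mfn =>
    if j == k then pvInnerK folders j i name ks mfn
    else
      let other := PySem.List.pyGetD folders k ""
      if PySem.Str.len other > i ∧
          PySem.Str.slice name none (some (i + 1)) = PySem.Str.slice other none (some (i + 1)) then
        PySem.Str.slice name none (some (i + 1))
      else pvInnerK folders j i name ks mfn

def group_folders (folders : List String) : List String :=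
  (PySem.List.pyRange 0 folders.length 1).foldl (fun folder_names j =>
    let name := PySem.List.pyGetD folders j ""
    let mfn := (PySem.List.pyRange 0 (PySem.Str.len name) 1).foldl
      (fun mfn i => pvInnerK folders j i name (PySem.List.pyRange 0 folders.length 1) mfn) ""
    if mfn = "" then folder_names ++ [name] else folder_names ++ [mfn]) []

-- ===== PORT B =====
-- Source B's `_lcp`: longest common prefix of two strings, counted char by char
def pvLcp : List Char → List Char → Nat
  | x :: xs, y :: ys => if x = y then pvLcp xs ys + 1 else 0
  | _, _ => 0

def pvLcpStr (s t : String) : Int := pvLcp s.toList t.toList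

def group_folders_alt (folders : List String) : List String :=
  let n : Int := folders.length
  let order := PySem.List.sorted (PySem.List.pyRange 0 n 1)
      (fun i => PySem.List.pyGetD folders i "")
  let best := (PySem.List.pyRange 0 n 1).foldl (fun (best : PySem.Dict Int Int) p =>
    let j := PySem.List.pyGetD order p 0
    let m : Int := 0
    let m := if 0 < p then
        pvLcpStr (PySem.List.pyGetD folders (PySem.List.pyGetD order (p - 1) 0) "")
                 (PySem.List.pyGetD folders j "")
      else m
    let m := if p + 1 < n then
        max m (pvLcpStr (PySem.List.pyGetD folders j "")
                        (PySem.List.pyGetD folders (PySem.List.pyGetD order (p + 1) 0) ""))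
      else m
    best.insert j m) PySem.Dict.empty
  (PySem.List.pyRange 0 n 1).map (fun j =>
    if best.getD j 0 ≠ 0 then
      PySem.Str.slice (PySem.List.pyGetD folders j "") none (some (best.getD j 0))
    else PySem.List.pyGetD folders j "")

-- ===== PRECONDITION & SPEC =====
def Spec_group_folders (folders : List String) (out : List String) : Prop := out = group_folders_alt folders
instance (folders : List String) (out : List String) : Decidable (Spec_group_folders folders out) := by unfold Spec_group_folders; infer_instance

-- ===== CLAIM (what is proved, stated in full; the proofs are below) =====
def Claim_equal_group_folders : Prop := ∀ (folders : List String), Dom_group_folders folders → Spec_group_folders folders (group_folders folders)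

-- ===== LEMMAS AND PROOFS =====

-- the common specification: out[j] = folders[j] truncated to the largest LCP it shares
-- with any other folder (folders[j] itself when that LCP is 0)
def pvName (folders : List String) (j : Nat) : List Char := (folders.getD j "").toList

def pvM (folders : List String) (j : Nat) : Nat :=
  (((List.range folders.length).filter (fun k => k ≠ j)).map
    (fun k => pvLcp (pvName folders j) (pvName folders k))).foldl max 0

def pvSpec (folders : List String) : List String :=
  (List.range folders.length).map (fun j =>
    if pvM folders j = 0 then folders.getD j ""
    else String.ofList ((pvName folders j).take (pvM folders j)))

-- basic facts about pvLcp
theorem pvLcp_le_left : ∀ a b : List Char, pvLcp a b ≤ a.length := by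
  intro a
  induction a with
  | nil => intro b; cases b <;> simp [pvLcp]
  | cons x xs ih => intro b; cases b with
    | nil => simp [pvLcp]
    | cons y ys => simp only [pvLcp]; split_ifs <;> simp [Nat.succ_le_succ (ih _)]

theorem pvLcp_comm : ∀ a b : List Char, pvLcp a b = pvLcp b a := by
  intro a
  induction a with
  | nil => intro b; cases b <;> simp [pvLcp]
  | cons x xs ih => intro b; cases b with
    | nil => simp [pvLcp]
    | cons y ys =>
      simp only [pvLcp]
      rcases eq_or_ne x y with h | h
      · simp [h, ih]
      · simp [h, Ne.symm h]

theorem pvLcp_succ_le_iff : ∀ (a b : List Char) (i : Nat),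
    i + 1 ≤ pvLcp a b ↔ i < b.length ∧ a.take (i + 1) = b.take (i + 1) := by
  intro a
  induction a with
  | nil =>
    intro b i; cases b <;> simp [pvLcp, List.take_succ_cons]
  | cons x xs ih =>
    intro b i
    cases b with
    | nil => simp [pvLcp]
    | cons y ys =>
      simp only [pvLcp, List.take_succ_cons, List.length_cons]
      rcases eq_or_ne x y with h | h
      · subst h
        cases i with
        | zero => simp
        | succ i' =>
          rw [if_pos rfl]
          simp only [List.cons.injEq, true_and]
          constructor
          · intro hle
            have h2 := (ih ys i').mp (by omega)
            exact ⟨by omega, h2.2⟩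
          · intro ⟨h1, h2⟩
            have := (ih ys i').mpr ⟨by omega, h2⟩
            omega
      · simp only [if_neg h]
        constructor
        · omega
        · intro ⟨_, h2⟩
          exact absurd (by simpa using congrArg (fun l => l.headD 'a') h2) h

-- foldl max on Nat lists
theorem pvFoldlMax_le_iff (l : List Nat) (a c : Nat) :
    l.foldl max a ≤ c ↔ a ≤ c ∧ ∀ x ∈ l, x ≤ c := by
  induction l generalizing a with
  | nil => simp
  | cons x xs ih =>
    simp only [List.foldl_cons, ih, List.mem_cons]
    constructor
    · intro ⟨h1, h2⟩
      exact ⟨le_trans (le_max_left _ _) h1, fun y hy => by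
        rcases hy with rfl | hy
        · exact le_trans (le_max_right _ _) h1
        · exact h2 y hy⟩
    · intro ⟨h1, h2⟩
      exact ⟨max_le h1 (h2 x (Or.inl rfl)), fun y hy => h2 y (Or.inr hy)⟩

theorem pvLt_foldlMax_iff (l : List Nat) (a c : Nat) :
    c < l.foldl max a ↔ c < a ∨ ∃ x ∈ l, c < x := by
  rcases Nat.lt_or_ge c (l.foldl max a) with h | h
  · simp only [h, true_iff]
    by_contra hc
    push Not at hc
    have := (pvFoldlMax_le_iff l a c).mpr ⟨hc.1, fun x hx => hc.2 x hx⟩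
    omega
  · have h' := (pvFoldlMax_le_iff l a c).mp h
    constructor
    · omega
    · intro hx
      rcases hx with hx | ⟨x, hx, hcx⟩
      · omega
      · exact absurd (h'.2 x hx) (by omega)

theorem pvM_le_len (folders : List String) (j : Nat) :
    pvM folders j ≤ (pvName folders j).length := by
  rw [show pvM folders j ≤ (pvName folders j).length ↔ _ from
    pvFoldlMax_le_iff _ 0 _]
  exact ⟨Nat.zero_le _, by
    intro x hx
    simp only [List.mem_map] at hx
    obtain ⟨k, _, rfl⟩ := hx
    exact pvLcp_le_left _ _⟩

-- the match condition at prefix length i+1, as A tests it, holds iff i+1 ≤ pvM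
theorem pvM_succ_le_iff (folders : List String) (j i : Nat) :
    i + 1 ≤ pvM folders j ↔
      ∃ k, k < folders.length ∧ k ≠ j ∧ i < (pvName folders k).length ∧
        (pvName folders j).take (i + 1) = (pvName folders k).take (i + 1) := by
  unfold pvM
  rw [show i + 1 ≤ _ ↔ i < _ from Iff.rfl, pvLt_foldlMax_iff]
  simp only [Nat.not_lt_zero, false_or, List.mem_map, List.mem_filter, List.mem_range]
  constructor
  · intro hex
    obtain ⟨x, ⟨k, ⟨hk, hkj⟩, hfk⟩, hcx⟩ := hex
    subst hfk
    have := (pvLcp_succ_le_iff (pvName folders j) (pvName folders k) i).mp (by omega)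
    exact ⟨k, hk, by simpa using hkj, this.1, this.2⟩
  · intro hex
    obtain ⟨k, hk, hkj, hlen, htake⟩ := hex
    refine ⟨pvLcp (pvName folders j) (pvName folders k), ⟨k, ⟨hk, by simpa using hkj⟩, rfl⟩, ?_⟩
    have := (pvLcp_succ_le_iff (pvName folders j) (pvName folders k) i).mpr ⟨hlen, htake⟩
    omega

-- ===== A-side =====

-- the Int-level match condition that pvInnerK tests for one k
def pvCond (folders : List String) (j i : Int) (name : String) (k : Int) : Prop :=
  ¬ j = k ∧ PySem.Str.len (PySem.List.pyGetD folders k "") > i ∧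
    PySem.Str.slice name none (some (i + 1)) =
      PySem.Str.slice (PySem.List.pyGetD folders k "") none (some (i + 1))

theorem pvInnerK_no (folders : List String) (j i : Int) (name : String) :
    ∀ (ks : List Int) (mfn : String),
      (∀ k ∈ ks, ¬ pvCond folders j i name k) →
      pvInnerK folders j i name ks mfn = mfn := by
  intro ks
  induction ks with
  | nil => intro mfn _; rfl
  | cons k ks ih =>
    intro mfn hall
    simp only [pvInnerK]
    by_cases hjk : j = k
    · rw [if_pos (show (j == k) = true by simp [hjk])]
      exact ih mfn (fun k' hk' => hall k' (List.mem_cons_of_mem _ hk'))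
    · rw [if_neg (show ¬ (j == k) = true by simp [hjk])]
      have hnc := hall k (List.mem_cons_self)
      rw [if_neg (fun hc => hnc ⟨hjk, hc⟩)]
      exact ih mfn (fun k' hk' => hall k' (List.mem_cons_of_mem _ hk'))

theorem pvInnerK_yes (folders : List String) (j i : Int) (name : String) :
    ∀ (ks : List Int) (mfn : String),
      (∃ k ∈ ks, pvCond folders j i name k) →
      pvInnerK folders j i name ks mfn = PySem.Str.slice name none (some (i + 1)) := by
  intro ks
  induction ks with
  | nil => intro mfn h; simp at h
  | cons k ks ih =>
    intro mfn hex
    simp only [pvInnerK]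
    by_cases hjk : j = k
    · rw [if_pos (show (j == k) = true by simp [hjk])]
      apply ih
      obtain ⟨k', hk', hc⟩ := hex
      rcases List.mem_cons.mp hk' with rfl | hk'
      · exact absurd hjk hc.1
      · exact ⟨k', hk', hc⟩
    · rw [if_neg (show ¬ (j == k) = true by simp [hjk])]
      by_cases hc : PySem.Str.len (PySem.List.pyGetD folders k "") > i ∧
          PySem.Str.slice name none (some (i + 1)) =
            PySem.Str.slice (PySem.List.pyGetD folders k "") none (some (i + 1))
      · rw [if_pos hc]
      · rw [if_neg hc]
        apply ih
        obtain ⟨k', hk', hc'⟩ := hex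
        rcases List.mem_cons.mp hk' with rfl | hk'
        · exact absurd hc'.2 hc
        · exact ⟨k', hk', hc'⟩

-- the condition over the whole k-range, at Nat level, is 'i + 1 ≤ pvM folders j'
theorem pvCond_exists_iff (folders : List String) (j i : Nat) (hj : j < folders.length) :
    (∃ k ∈ PySem.List.pyRange 0 folders.length 1,
        pvCond folders j i (PySem.List.pyGetD folders j "") k) ↔
      i + 1 ≤ pvM folders j := by
  rw [pvM_succ_le_iff]
  constructor
  · intro ⟨k, hkmem, hne, hlen, hsl⟩
    rw [PySem.List.mem_pyRange_one] at hkmem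
    obtain ⟨hk0, hkn⟩ := hkmem
    refine ⟨k.toNat, by omega, ?_, ?_, ?_⟩
    · intro hc; exact hne (by omega)
    · have : PySem.List.pyGetD folders k "" = folders.getD k.toNat "" := by
        exact (PySem.List.pyGetD_eq_getElem folders "" hk0 hkn).trans
          (List.getD_eq_getElem folders "" (by omega)).symm
      rw [this, PySem.Str.len_eq] at hlen
      unfold pvName
      omega
    · have hk' : PySem.List.pyGetD folders k "" = folders.getD k.toNat "" := by
        exact (PySem.List.pyGetD_eq_getElem folders "" hk0 hkn).trans
          (List.getD_eq_getElem folders "" (by omega)).symm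
      have := congrArg String.toList hsl
      simp only [PySem.Str.toList_slice, PySem.Chars.slice_eq_listSlice, hk'] at this
      rw [show ((i : Int) + 1) = ((i + 1 : Nat) : Int) by push_cast; ring,
        PySem.List.slice_to _ (by positivity), PySem.List.slice_to _ (by positivity)] at this
      simpa [pvName, PySem.List.pyGetD_natCast] using this
  · intro ⟨k, hkn, hkj, hlen, htake⟩
    refine ⟨(k : Int), by rw [PySem.List.mem_pyRange_one]; omega, ?_, ?_, ?_⟩
    · intro hc; exact hkj (by omega)
    · rw [PySem.List.pyGetD_natCast, PySem.Str.len_eq]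
      unfold pvName at hlen
      omega
    · rw [← String.toList_inj]
      simp only [PySem.Str.toList_slice, PySem.Chars.slice_eq_listSlice,
        PySem.List.pyGetD_natCast]
      rw [show ((i : Int) + 1) = ((i + 1 : Nat) : Int) by push_cast; ring,
        PySem.List.slice_to _ (by positivity), PySem.List.slice_to _ (by positivity)]
      simpa [pvName] using htake

theorem pvStep (folders : List String) (j i : Nat) (hj : j < folders.length) (mfn : String) :
    pvInnerK folders j i (PySem.List.pyGetD folders j "")
        (PySem.List.pyRange 0 folders.length 1) mfn =
      if i + 1 ≤ pvM folders j then String.ofList ((pvName folders j).take (i + 1)) else mfn := by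
  by_cases h : i + 1 ≤ pvM folders j
  · rw [if_pos h, pvInnerK_yes folders j i _ _ mfn ((pvCond_exists_iff folders j i hj).mpr h)]
    rw [← String.toList_inj]
    simp only [PySem.Str.toList_slice, PySem.Chars.slice_eq_listSlice,
      PySem.List.pyGetD_natCast]
    rw [show ((i : Int) + 1) = ((i + 1 : Nat) : Int) by push_cast; ring,
      PySem.List.slice_to _ (by positivity)]
    simp [pvName]
  · rw [if_neg h, pvInnerK_no]
    intro k hk hc
    exact h ((pvCond_exists_iff folders j i hj).mp ⟨k, hk, hc⟩)

theorem pvLoop (folders : List String) (j : Nat) (hj : j < folders.length) :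
    ∀ t, t ≤ (pvName folders j).length →
      (List.range t).foldl
          (fun mfn (i : Nat) => pvInnerK folders j i (PySem.List.pyGetD folders j "")
            (PySem.List.pyRange 0 folders.length 1) mfn) "" =
        if min t (pvM folders j) = 0 then ""
        else String.ofList ((pvName folders j).take (min t (pvM folders j))) := by
  intro t
  induction t with
  | zero => intro _; simp
  | succ t ih =>
    intro ht
    rw [List.range_succ, List.foldl_append, List.foldl_cons, List.foldl_nil,
      ih (by omega), pvStep folders j t hj]
    by_cases hm : t + 1 ≤ pvM folders j
    · rw [if_pos hm, if_neg (by omega), min_eq_left (by omega)]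
    · rw [if_neg hm, show min (t + 1) (pvM folders j) = min t (pvM folders j) by omega]

theorem pvElem (folders : List String) (j : Nat) (hj : j < folders.length) :
    (let name := PySem.List.pyGetD folders (j : Int) ""
     let mfn := (PySem.List.pyRange 0 (PySem.Str.len name) 1).foldl
       (fun mfn i => pvInnerK folders j i name (PySem.List.pyRange 0 folders.length 1) mfn) ""
     if mfn = "" then name else mfn) =
      (if pvM folders j = 0 then folders.getD j ""
       else String.ofList ((pvName folders j).take (pvM folders j))) := by
  have hname : PySem.List.pyGetD folders (j : Int) "" = folders.getD j "" :=
    PySem.List.pyGetD_natCast folders j ""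
  have hlen : PySem.Str.len (PySem.List.pyGetD folders (j : Int) "") =
      ((pvName folders j).length : Int) := by
    rw [hname, PySem.Str.len_eq]; rfl
  simp only [hlen]
  rw [PySem.List.pyRange_one 0 ((pvName folders j).length : Int), List.foldl_map]
  simp only [zero_add, Int.sub_zero, Int.toNat_natCast]
  rw [pvLoop folders j hj _ le_rfl, min_eq_right (pvM_le_len folders j)]
  by_cases hm : pvM folders j = 0
  · rw [if_pos (by simp [hm]), if_pos hm, hname]
  · have hlenm := pvM_le_len folders j
    have hne : String.ofList (List.take (pvM folders j) (pvName folders j)) ≠ "" := by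
      intro hc
      have h1 : min (pvM folders j) (pvName folders j).length = 0 := by
        simpa using congrArg List.length (congrArg String.toList hc)
      omega
    rw [if_neg hm, if_neg hne, if_neg hm]

theorem pvFoldlAppendGen (body : List String → Int → List String) (f : Int → String)
    (h : ∀ acc x, body acc x = acc ++ [f x]) :
    ∀ (l : List Int) (acc : List String), l.foldl body acc = acc ++ l.map f := by
  intro l
  induction l with
  | nil => intro acc; simp
  | cons x xs ih => intro acc; rw [List.foldl_cons, h, ih, List.map_cons]; simp

theorem pvMapPyRangeZero {α : Type} (f : Int → α) (n : Nat) :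
    (PySem.List.pyRange 0 n 1).map f = (List.range n).map (fun k : Nat => f (k : Int)) := by
  rw [PySem.List.pyRange_one, List.map_map]
  rw [show ((n : Int) - 0).toNat = n by omega]
  apply List.map_congr_left
  intro a _
  simp

theorem pvA_eq_spec (folders : List String) : group_folders folders = pvSpec folders := by
  unfold group_folders
  rw [pvFoldlAppendGen _
    (fun j =>
      let name := PySem.List.pyGetD folders j ""
      let mfn := (PySem.List.pyRange 0 (PySem.Str.len name) 1).foldl
        (fun mfn i => pvInnerK folders j i name (PySem.List.pyRange 0 folders.length 1) mfn) ""
      if mfn = "" then name else mfn)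
    (by
      intro acc x
      dsimp only
      exact (apply_ite (fun s => acc ++ [s]) _ _ _).symm)]
  rw [pvMapPyRangeZero]
  unfold pvSpec
  apply List.map_congr_left
  intro a ha
  have hj : a < folders.length := List.mem_range.mp ha
  exact pvElem folders a hj


-- ===== B-side =====

theorem pvCons_le_inv (x : Char) (l r m : List Char) (h1 : x :: l ≤ m) (h2 : m ≤ x :: r) :
    ∃ ms, m = x :: ms ∧ l ≤ ms ∧ ms ≤ r := by
  cases m with
  | nil =>
    rcases h1.lt_or_eq with h | h
    · exact absurd h (List.not_lt_nil _)
    · simp at h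
  | cons y ms =>
    have hxy : x = y ∧ l ≤ ms := by
      rcases h1.lt_or_eq with h | h
      · rcases List.cons_lt_cons_iff.mp h with h' | ⟨h', h''⟩
        · rcases h2.lt_or_eq with g | g
          · rcases List.cons_lt_cons_iff.mp g with g' | ⟨g', _⟩
            · exact absurd (h'.trans g') (lt_irrefl x)
            · exact absurd (g' ▸ h') (lt_irrefl x)
          · injection g with g' _; exact absurd (g' ▸ h') (lt_irrefl y)
        · exact ⟨h', le_of_lt h''⟩
      · injection h with h' h''; exact ⟨h', le_of_eq h''⟩
    obtain ⟨hxy, hl⟩ := hxy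
    subst hxy
    have hms : ms ≤ r := by
      rcases h2.lt_or_eq with g | g
      · rcases List.cons_lt_cons_iff.mp g with g' | ⟨_, g''⟩
        · exact absurd g' (lt_irrefl x)
        · exact le_of_lt g''
      · injection g with _ g'; exact le_of_eq g'
    exact ⟨ms, rfl, hl, hms⟩

theorem pvLcp_chain : ∀ a b c : List Char, a ≤ b → b ≤ c →
    pvLcp a c ≤ pvLcp a b ∧ pvLcp a c ≤ pvLcp b c := by
  intro a
  induction a with
  | nil => intro b c _ _; cases c <;> simp [pvLcp]
  | cons x xs ih =>
    intro b c hab hbc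
    cases c with
    | nil => simp [pvLcp]
    | cons z zs =>
      by_cases hxz : x = z
      · subst hxz
        obtain ⟨ms, rfl, h1, h2⟩ := pvCons_le_inv x xs zs b hab hbc
        have := ih ms zs h1 h2
        simp [pvLcp]
        omega
      · simp [pvLcp, hxz]

-- B-side proof-side definitions: the sorted index order, and the original index at sorted position q
def pvOrder (folders : List String) : List Int :=
  PySem.List.sorted (PySem.List.pyRange 0 folders.length 1)
    (fun i => PySem.List.pyGetD folders i "")

def pvG (folders : List String) (q : Nat) : Nat := ((pvOrder folders).getD q 0).toNat

def pvVf (folders : List String) (p : Int) : Int :=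
  let j := PySem.List.pyGetD (pvOrder folders) p 0
  let m : Int := 0
  let m := if 0 < p then
      pvLcpStr (PySem.List.pyGetD folders (PySem.List.pyGetD (pvOrder folders) (p - 1) 0) "")
               (PySem.List.pyGetD folders j "")
    else m
  let m := if p + 1 < (folders.length : Int) then
      max m (pvLcpStr (PySem.List.pyGetD folders j "")
                      (PySem.List.pyGetD folders (PySem.List.pyGetD (pvOrder folders) (p + 1) 0) ""))
    else m
  m

def pvBest (folders : List String) : PySem.Dict Int Int :=
  (PySem.List.pyRange 0 folders.length 1).foldl
    (fun best p => best.insert (PySem.List.pyGetD (pvOrder folders) p 0) (pvVf folders p))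
    PySem.Dict.empty

theorem pvOrder_length (folders : List String) : (pvOrder folders).length = folders.length := by
  unfold pvOrder
  rw [PySem.List.length_sorted, PySem.List.length_pyRange_one]
  omega

theorem pvOrder_perm (folders : List String) :
    (pvOrder folders).Perm (PySem.List.pyRange 0 folders.length 1) :=
  PySem.List.sorted_perm _ _ _

theorem pvOrder_nodup (folders : List String) : (pvOrder folders).Nodup :=
  ((pvOrder_perm folders).nodup_iff).mpr (PySem.List.nodup_pyRange_one _ _)

theorem pvOrder_bounds (folders : List String) {x : Int} (hx : x ∈ pvOrder folders) :
    0 ≤ x ∧ x < folders.length := by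
  have := (pvOrder_perm folders).mem_iff.mp hx
  rw [PySem.List.mem_pyRange_one] at this
  exact this

theorem pvOrder_getElem (folders : List String) (q : Nat) (hq : q < folders.length) :
    (pvOrder folders)[q]'(by rw [pvOrder_length]; exact hq) = ((pvG folders q : Nat) : Int) := by
  have hmem : (pvOrder folders)[q]'(by rw [pvOrder_length]; exact hq) ∈ pvOrder folders :=
    List.getElem_mem _
  have hb := pvOrder_bounds folders hmem
  unfold pvG
  rw [List.getD_eq_getElem (pvOrder folders) 0 (by rw [pvOrder_length]; exact hq)]
  omega

theorem pvG_lt (folders : List String) (q : Nat) (hq : q < folders.length) :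
    pvG folders q < folders.length := by
  have := pvOrder_getElem folders q hq
  have hmem : (pvOrder folders)[q]'(by rw [pvOrder_length]; exact hq) ∈ pvOrder folders :=
    List.getElem_mem _
  have hb := pvOrder_bounds folders hmem
  omega

theorem pvG_inj (folders : List String) (q q' : Nat) (hq : q < folders.length)
    (hq' : q' < folders.length) (hne : q ≠ q') : pvG folders q ≠ pvG folders q' := by
  intro hc
  apply hne
  have h1 := pvOrder_getElem folders q hq
  have h2 := pvOrder_getElem folders q' hq'
  have : (pvOrder folders)[q]'(by rw [pvOrder_length]; exact hq) =
      (pvOrder folders)[q']'(by rw [pvOrder_length]; exact hq') := by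
    rw [h1, h2, hc]
  exact (pvOrder_nodup folders).getElem_inj_iff.mp this

theorem pvG_surj (folders : List String) (j : Nat) (hj : j < folders.length) :
    ∃ p, p < folders.length ∧ pvG folders p = j := by
  have hmem : ((j : Nat) : Int) ∈ pvOrder folders := by
    rw [(pvOrder_perm folders).mem_iff, PySem.List.mem_pyRange_one]
    omega
  obtain ⟨p, hp, hval⟩ := List.getElem_of_mem hmem
  have hp' : p < folders.length := by rw [← pvOrder_length folders]; exact hp
  refine ⟨p, hp', ?_⟩
  have := pvOrder_getElem folders p hp'
  rw [this] at hval
  omega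

theorem pvMono (folders : List String) (q q' : Nat) (hle : q ≤ q') (hq' : q' < folders.length) :
    folders.getD (pvG folders q) "" ≤ folders.getD (pvG folders q') "" := by
  have hlen : q' < (PySem.List.sorted (PySem.List.pyRange 0 folders.length 1)
      (fun i => PySem.List.pyGetD folders i "")).length := by
    rw [show (PySem.List.sorted (PySem.List.pyRange 0 folders.length 1)
      (fun i => PySem.List.pyGetD folders i "")).length = (pvOrder folders).length from rfl,
      pvOrder_length]
    exact hq'
  have hmono := PySem.List.key_sorted_getElem_mono
    (PySem.List.pyRange 0 folders.length 1) (fun i => PySem.List.pyGetD folders i "")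
    hle hlen
  have e1 : (PySem.List.sorted (PySem.List.pyRange 0 folders.length 1)
      (fun i => PySem.List.pyGetD folders i ""))[q]'(by omega) = ((pvG folders q : Nat) : Int) :=
    pvOrder_getElem folders q (by omega)
  have e2 : (PySem.List.sorted (PySem.List.pyRange 0 folders.length 1)
      (fun i => PySem.List.pyGetD folders i ""))[q']'hlen = ((pvG folders q' : Nat) : Int) :=
    pvOrder_getElem folders q' hq'
  rw [e1, e2] at hmono
  simpa [PySem.List.pyGetD_natCast] using hmono

-- strings at sorted positions q < p share no longer a prefix with position p than the left neighbour
theorem pvChainL (folders : List String) (p q : Nat) (hqp : q < p) (hp : p < folders.length) :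
    pvLcp (pvName folders (pvG folders p)) (pvName folders (pvG folders q)) ≤
      pvLcp (pvName folders (pvG folders (p - 1))) (pvName folders (pvG folders p)) := by
  have h1 : (folders.getD (pvG folders q) "").toList ≤ (folders.getD (pvG folders (p - 1)) "").toList := by
    rw [← String.le_iff_toList_le]; exact pvMono folders q (p - 1) (by omega) (by omega)
  have h2 : (folders.getD (pvG folders (p - 1)) "").toList ≤ (folders.getD (pvG folders p) "").toList := by
    rw [← String.le_iff_toList_le]; exact pvMono folders (p - 1) p (by omega) hp
  have := pvLcp_chain _ _ _ h1 h2
  unfold pvName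
  rw [pvLcp_comm (folders.getD (pvG folders p) "").toList]
  exact this.2

theorem pvChainR (folders : List String) (p q : Nat) (hpq : p < q) (hq : q < folders.length) :
    pvLcp (pvName folders (pvG folders p)) (pvName folders (pvG folders q)) ≤
      pvLcp (pvName folders (pvG folders p)) (pvName folders (pvG folders (p + 1))) := by
  have h1 : (folders.getD (pvG folders p) "").toList ≤ (folders.getD (pvG folders (p + 1)) "").toList := by
    rw [← String.le_iff_toList_le]; exact pvMono folders p (p + 1) (by omega) (by omega)
  have h2 : (folders.getD (pvG folders (p + 1)) "").toList ≤ (folders.getD (pvG folders q) "").toList := by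
    rw [← String.le_iff_toList_le]; exact pvMono folders (p + 1) q (by omega) hq
  exact (pvLcp_chain _ _ _ h1 h2).1

-- the largest LCP of the folder at sorted position p is attained at a sorted neighbour
theorem pvVal (folders : List String) (p : Nat) (hp : p < folders.length) :
    pvM folders (pvG folders p) =
      (if 0 < p then pvLcp (pvName folders (pvG folders (p - 1))) (pvName folders (pvG folders p)) else 0) ⊔
      (if p + 1 < folders.length then
        pvLcp (pvName folders (pvG folders p)) (pvName folders (pvG folders (p + 1))) else 0) := by
  apply le_antisymm
  · unfold pvM
    rw [pvFoldlMax_le_iff]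
    refine ⟨Nat.zero_le _, ?_⟩
    intro x hx
    simp only [List.mem_map, List.mem_filter, List.mem_range] at hx
    obtain ⟨k, ⟨hkn, hkj⟩, rfl⟩ := hx
    have hkj' : k ≠ pvG folders p := by simpa using hkj
    obtain ⟨q, hq, hgq⟩ := pvG_surj folders k hkn
    have hqp : q ≠ p := by
      intro hc; exact hkj' (by rw [← hgq, hc])
    rcases Nat.lt_or_ge q p with h | h
    · have := pvChainL folders p q h hp
      rw [hgq] at this
      exact le_sup_of_le_left (by rw [if_pos (by omega)]; exact this)
    · have hpq : p < q := by omega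
      have := pvChainR folders p q hpq hq
      rw [hgq] at this
      exact le_sup_of_le_right (by rw [if_pos (by omega)]; exact this)
  · apply sup_le
    · by_cases h0 : 0 < p
      · rw [if_pos h0]
        rw [pvLcp_comm]
        have hmem : pvLcp (pvName folders (pvG folders p)) (pvName folders (pvG folders (p - 1))) ∈
            (((List.range folders.length).filter (fun k => k ≠ pvG folders p)).map
              (fun k => pvLcp (pvName folders (pvG folders p)) (pvName folders k))) := by
          apply List.mem_map_of_mem
          rw [List.mem_filter, List.mem_range]
          exact ⟨pvG_lt folders (p - 1) (by omega),
            by simpa using pvG_inj folders (p - 1) p (by omega) hp (by omega)⟩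
        exact (PySem.List.le_foldl_max _ 0).2 _ hmem
      · rw [if_neg h0]; exact Nat.zero_le _
    · by_cases h1 : p + 1 < folders.length
      · rw [if_pos h1]
        have hmem : pvLcp (pvName folders (pvG folders p)) (pvName folders (pvG folders (p + 1))) ∈
            (((List.range folders.length).filter (fun k => k ≠ pvG folders p)).map
              (fun k => pvLcp (pvName folders (pvG folders p)) (pvName folders k))) := by
          apply List.mem_map_of_mem
          rw [List.mem_filter, List.mem_range]
          exact ⟨pvG_lt folders (p + 1) h1,
            by simpa using pvG_inj folders (p + 1) p h1 hp (by omega)⟩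
        exact (PySem.List.le_foldl_max _ 0).2 _ hmem
      · rw [if_neg h1]; exact Nat.zero_le _

theorem pvFoldlPyRangeZero {α : Type} (f : α → Int → α) (n : Nat) (init : α) :
    (PySem.List.pyRange 0 n 1).foldl f init =
      (List.range n).foldl (fun acc (k : Nat) => f acc (k : Int)) init := by
  rw [PySem.List.pyRange_one, List.foldl_map]
  rw [show ((n : Int) - 0).toNat = n by omega]
  simp only [zero_add]

theorem pvMapRangeOrder (folders : List String) :
    (List.range folders.length).map
      (fun p : Nat => PySem.List.pyGetD (pvOrder folders) (p : Int) 0) = pvOrder folders := by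
  apply List.ext_getElem
  · rw [List.length_map, List.length_range, pvOrder_length]
  · intro q h1 h2
    rw [List.getElem_map, List.getElem_range, PySem.List.pyGetD_natCast,
      List.getD_eq_getElem (pvOrder folders) 0 h2]

theorem pvBest_items (folders : List String) :
    (pvBest folders).items =
      (List.range folders.length).map
        (fun p : Nat => (PySem.List.pyGetD (pvOrder folders) (p : Int) 0, pvVf folders (p : Int))) := by
  unfold pvBest
  rw [pvFoldlPyRangeZero]
  rw [PySem.Dict.items_foldl_insert_fresh (List.range folders.length)
    (fun p : Nat => PySem.List.pyGetD (pvOrder folders) (p : Int) 0)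
    (fun p : Nat => pvVf folders (p : Int)) PySem.Dict.empty
    (by intro a _; rfl)
    (by rw [pvMapRangeOrder]; exact pvOrder_nodup folders)]
  rfl

theorem pvBest_keys_nodup (folders : List String) : (pvBest folders).keys.Nodup := by
  have : (pvBest folders).keys = pvOrder folders := by
    show (pvBest folders).items.map (·.1) = _
    rw [pvBest_items, List.map_map]
    exact pvMapRangeOrder folders
  rw [this]
  exact pvOrder_nodup folders

theorem pvBest_getD (folders : List String) (p : Nat) (hp : p < folders.length) :
    (pvBest folders).getD ((pvG folders p : Nat) : Int) 0 = pvVf folders (p : Int) := by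
  have hkey : PySem.List.pyGetD (pvOrder folders) (p : Int) 0 = ((pvG folders p : Nat) : Int) := by
    rw [PySem.List.pyGetD_natCast, List.getD_eq_getElem (pvOrder folders) 0
      (by rw [pvOrder_length]; exact hp)]
    exact pvOrder_getElem folders p hp
  have hmem : (((pvG folders p : Nat) : Int), pvVf folders (p : Int)) ∈ (pvBest folders).items := by
    rw [pvBest_items]
    refine List.mem_map.mpr ⟨p, List.mem_range.mpr hp, ?_⟩
    rw [hkey]
  exact PySem.Dict.getD_of_mem_items _ hmem (pvBest_keys_nodup folders) 0

theorem pvVf_eq (folders : List String) (p : Nat) (hp : p < folders.length) :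
    pvVf folders (p : Int) =
      (((if 0 < p then pvLcp (pvName folders (pvG folders (p - 1))) (pvName folders (pvG folders p)) else 0) ⊔
        (if p + 1 < folders.length then
          pvLcp (pvName folders (pvG folders p)) (pvName folders (pvG folders (p + 1))) else 0) : Nat) : Int) := by
  have hidx : ∀ (q : Nat), q < folders.length →
      PySem.List.pyGetD (pvOrder folders) (q : Int) 0 = ((pvG folders q : Nat) : Int) := by
    intro q hq
    rw [PySem.List.pyGetD_natCast, List.getD_eq_getElem (pvOrder folders) 0
      (by rw [pvOrder_length]; exact hq)]
    exact pvOrder_getElem folders q hq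
  have hlcp : ∀ (a b : Nat), pvLcpStr (folders.getD a "") (folders.getD b "") =
      ((pvLcp (pvName folders a) (pvName folders b) : Nat) : Int) := fun a b => rfl
  unfold pvVf
  dsimp only
  rw [hidx p hp]
  by_cases h0 : 0 < p
  · have h0' : (0 : Int) < (p : Int) := by exact_mod_cast h0
    have hm1 : ((p : Int) - 1) = ((p - 1 : Nat) : Int) := by omega
    rw [if_pos h0', if_pos h0, hm1, hidx (p - 1) (by omega)]
    simp only [PySem.List.pyGetD_natCast]
    by_cases h1 : p + 1 < folders.length
    · have h1' : (p : Int) + 1 < (folders.length : Int) := by exact_mod_cast h1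
      have hp1 : ((p : Int) + 1) = ((p + 1 : Nat) : Int) := by omega
      rw [if_pos h1', if_pos h1, hp1, hidx (p + 1) h1]
      simp only [PySem.List.pyGetD_natCast]
      rw [hlcp, hlcp]
      push_cast
      rfl
    · have h1' : ¬ ((p : Int) + 1 < (folders.length : Int)) := by
        intro hc; exact h1 (by exact_mod_cast hc)
      rw [if_neg h1', if_neg h1, hlcp]
      simp
  · have h0' : ¬ ((0 : Int) < (p : Int)) := by
      intro hc; exact h0 (by exact_mod_cast hc)
    rw [if_neg h0', if_neg h0]
    by_cases h1 : p + 1 < folders.length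
    · have h1' : (p : Int) + 1 < (folders.length : Int) := by exact_mod_cast h1
      have hp1 : ((p : Int) + 1) = ((p + 1 : Nat) : Int) := by omega
      rw [if_pos h1', if_pos h1, hp1, hidx (p + 1) h1]
      simp only [PySem.List.pyGetD_natCast]
      rw [hlcp]
      push_cast
      rfl
    · have h1' : ¬ ((p : Int) + 1 < (folders.length : Int)) := by
        intro hc; exact h1 (by exact_mod_cast hc)
      rw [if_neg h1', if_neg h1]
      simp
theorem pvB_eq_spec (folders : List String) : group_folders_alt folders = pvSpec folders := by
  have hrfl : group_folders_alt folders =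
      (PySem.List.pyRange 0 folders.length 1).map (fun j =>
        if (pvBest folders).getD j 0 ≠ 0 then
          PySem.Str.slice (PySem.List.pyGetD folders j "") none (some ((pvBest folders).getD j 0))
        else PySem.List.pyGetD folders j "") := rfl
  rw [hrfl, pvMapPyRangeZero]
  unfold pvSpec
  apply List.map_congr_left
  intro j hj
  have hjn : j < folders.length := List.mem_range.mp hj
  obtain ⟨p, hp, hgp⟩ := pvG_surj folders j hjn
  have hval : (pvBest folders).getD ((j : Nat) : Int) 0 = ((pvM folders j : Nat) : Int) := by
    rw [← hgp, pvBest_getD folders p hp, pvVf_eq folders p hp, pvVal folders p hp]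
  rw [hval, PySem.List.pyGetD_natCast]
  by_cases hm : pvM folders j = 0
  · rw [if_neg (by simp [hm]), if_pos hm]
  · rw [if_pos (by exact_mod_cast hm), if_neg hm]
    rw [← String.toList_inj]
    simp only [PySem.Str.toList_slice, PySem.Chars.slice_eq_listSlice]
    rw [PySem.List.slice_to _ (by positivity)]
    simp [pvName]

-- ===== VERDICT (by name: the statement is the Claim_ definition above) =====
theorem group_folders_spec : Claim_equal_group_folders := by
  intro folders _
  unfold Spec_group_folders
  rw [pvA_eq_spec, pvB_eq_spec]
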